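-- pv_equiv track=rewrite | github.com/huan186/LeetCode | 3755-find-maximum-balanced-xor-subarray-length/3755-find-maximum-balanced-xor-subarray-length.py | maxBalancedSubarray
-- ===== SOURCE A (Python) =====
-- from typing import List
--
-- def maxBalancedSubarray(nums: List[int]) -> int:
--     seen = {(0, 0): -1}  # value, evens - odds, index
--     xor = 0
--     diff = 0
--     ans = 0
--     for i in range(len(nums)):
--         xor ^= nums[i]
--         diff += 1 if nums[i] % 2 == 0 else -1
--         if (xor, diff) in seen:
--             ans = max(ans, i - seen[(xor, diff)])
--         else:
--             seen[(xor, diff)] = i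
--     return ans
-- ===== SOURCE B (Python) =====
-- from typing import List
--
-- def maxBalancedSubarray(nums: List[int]) -> int:
--     # Brute force over all boundary pairs: build the prefix-state list
--     # (prefix xor, prefix evens-odds) with base (0, 0), then compare every
--     # pair of boundaries and take the longest distance between equal states.
--     pref = [(0, 0)]
--     x = d = 0
--     for v in nums:
--         x ^= v
--         d += 1 if v % 2 == 0 else -1
--         pref.append((x, d))
--     ans = 0
--     earlier = []  # (index, state) of all boundaries already seen
--     for j, p in enumerate(pref):
--         for i, q in earlier:
--             if q == p:
--                 ans = max(ans, j - i)
--         earlier.append((j, p))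
--     return ans
-- ===== Notes on version B (the rewrite author's own statement) =====
-- stated objective: alternative
-- what changed: Replaces the single-pass hashmap of first-seen (xor, parity-diff) states by an O(n^2) brute force: build the full prefix-state list and compare every pair of boundaries, taking the longest distance between equal states.
import Mathlib
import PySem

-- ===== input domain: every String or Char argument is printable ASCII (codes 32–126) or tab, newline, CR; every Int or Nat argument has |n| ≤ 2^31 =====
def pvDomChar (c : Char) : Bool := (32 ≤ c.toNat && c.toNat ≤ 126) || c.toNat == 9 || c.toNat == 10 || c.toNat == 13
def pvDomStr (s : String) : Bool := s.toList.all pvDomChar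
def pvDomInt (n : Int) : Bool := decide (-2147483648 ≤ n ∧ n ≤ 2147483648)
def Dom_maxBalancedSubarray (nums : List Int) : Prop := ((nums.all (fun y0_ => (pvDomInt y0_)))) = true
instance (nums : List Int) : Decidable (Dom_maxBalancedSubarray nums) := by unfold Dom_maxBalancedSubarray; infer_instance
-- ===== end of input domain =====

-- B replaces A's single-pass hashmap of first-seen (xor, parity-diff) prefix states by an
-- O(n^2) brute force comparing every pair of prefix-state boundaries (alternative, not faster).

-- ===== PORT A =====
def maxBalancedSubarray (nums : List Int) : Int :=
  ((PySem.List.enumerate nums 0).foldl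
    (fun (st : PySem.Dict (Int × Int) Int × (Int × Int) × Int) iv =>
      let xr := PySem.Int.bxor st.2.1.1 iv.2
      let df := st.2.1.2 + (if PySem.Int.mod iv.2 2 = 0 then (1 : Int) else -1)
      match st.1.get? (xr, df) with
      | some j => (st.1, (xr, df), max st.2.2 (iv.1 - j))
      | none => (st.1.insert (xr, df) iv.1, (xr, df), st.2.2))
    (PySem.Dict.empty.insert ((0 : Int), (0 : Int)) (-1), ((0 : Int), (0 : Int)), (0 : Int))).2.2

-- ===== PORT B =====
def maxBalancedSubarray_alt (nums : List Int) : Int :=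
  let pr := nums.foldl
    (fun (st : List (Int × Int) × (Int × Int)) v =>
      let t := (PySem.Int.bxor st.2.1 v, st.2.2 + (if PySem.Int.mod v 2 = 0 then (1 : Int) else -1))
      (st.1 ++ [t], t))
    ([((0 : Int), (0 : Int))], ((0 : Int), (0 : Int)))
  ((PySem.List.enumerate pr.1 0).foldl
    (fun (st : List (Int × (Int × Int)) × Int) jp =>
      let a := st.1.foldl
        (fun (a : Int) iq => if iq.2 = jp.2 then max a (jp.1 - iq.1) else a) st.2
      (st.1 ++ [(jp.1, jp.2)], a))
    ([], 0)).2

-- ===== PRECONDITION & SPEC =====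
def Spec_maxBalancedSubarray (nums : List Int) (out : Int) : Prop := out = maxBalancedSubarray_alt nums
instance (nums : List Int) (out : Int) : Decidable (Spec_maxBalancedSubarray nums out) := by unfold Spec_maxBalancedSubarray; infer_instance

-- ===== CLAIM (what is proved, stated in full; the proofs are below) =====
def Claim_equal_maxBalancedSubarray : Prop := ∀ (nums : List Int), Dom_maxBalancedSubarray nums → Spec_maxBalancedSubarray nums (maxBalancedSubarray nums)

-- ===== LEMMAS AND PROOFS =====

-- the shared prefix-state transition and the list of future states
def pvStep (s : Int × Int) (v : Int) : Int × Int :=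
  (PySem.Int.bxor s.1 v, s.2 + (if PySem.Int.mod v 2 = 0 then (1 : Int) else -1))

def pvStates (s : Int × Int) : List Int → List (Int × Int)
  | [] => []
  | v :: l => pvStep s v :: pvStates (pvStep s v) l

def pvLast (s : Int × Int) : List Int → Int × Int
  | [] => s
  | v :: l => pvLast (pvStep s v) l

-- the per-boundary answer candidates, relative to the list Q of earlier prefix states
def pvCands (Q : List (Int × Int)) (s : Int × Int) : List Int → List Int
  | [] => []
  | v :: l =>
    (match PySem.List.index? Q (pvStep s v) with
     | some i => (Q.length : Int) - (i : Int)
     | none => 0) :: pvCands (Q ++ [pvStep s v]) (pvStep s v) l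

lemma pv_build (l : List Int) : ∀ (acc : List (Int × Int)) (s : Int × Int),
    l.foldl
      (fun (st : List (Int × Int) × (Int × Int)) v =>
        let t := (PySem.Int.bxor st.2.1 v, st.2.2 + (if PySem.Int.mod v 2 = 0 then (1 : Int) else -1))
        (st.1 ++ [t], t))
      (acc, s)
    = (acc ++ pvStates s l, pvLast s l) := by
  induction l with
  | nil => intro acc s; simp [pvStates, pvLast]
  | cons v l ih =>
    intro acc s
    simp only [List.foldl_cons, pvStates, pvLast]
    rw [ih]
    simp [pvStep]

-- B's inner brute-force scan over the indexed earlier boundaries computes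
-- the distance to the FIRST equal state (the farthest one), max'd into ans.
lemma pv_inner (Q : List (Int × Int)) : ∀ (t : Int × Int) (k j ans : Int),
    k + (Q.length : Int) ≤ j →
    (PySem.List.enumerate Q k).foldl
      (fun (a : Int) iq => if iq.2 = t then max a (j - iq.1) else a) ans
    = (match PySem.List.index? Q t with
       | some i => max ans (j - (k + (i : Int)))
       | none => ans) := by
  induction Q with
  | nil => intro t k j ans _; simp [PySem.List.enumerate, PySem.List.index?]
  | cons q Q ih =>
    intro t k j ans hj
    simp only [List.length_cons] at hj
    rw [PySem.List.enumerate_cons, List.foldl_cons]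
    by_cases hq : q = t
    · subst hq
      rw [PySem.List.index?_cons_self]
      simp only [if_true]
      rw [ih q (k + 1) j (max ans (j - k)) (by omega)]
      cases hx : PySem.List.index? Q q with
      | some i =>
        have hle : j - (k + 1 + (i : Int)) ≤ j - k := by
          have := Int.natCast_nonneg i; omega
        simp only []
        rw [max_eq_left (le_trans hle (le_max_right ans (j - k)))]
        norm_num
      | none => simp
    · rw [PySem.List.index?_cons_of_ne _ hq]
      rw [if_neg hq]
      rw [ih t (k + 1) j ans (by omega)]
      cases hx : PySem.List.index? Q t with
      | some i => simp only [Option.map_some]; push_cast; ring_nf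
      | none => simp

lemma pv_B_loop (l : List Int) : ∀ (Q : List (Int × Int)) (s : Int × Int) (ans : Int),
    0 ≤ ans →
    ((PySem.List.enumerate (pvStates s l) (Q.length : Int)).foldl
      (fun (st : List (Int × (Int × Int)) × Int) jp =>
        let a := st.1.foldl
          (fun (a : Int) iq => if iq.2 = jp.2 then max a (jp.1 - iq.1) else a) st.2
        (st.1 ++ [(jp.1, jp.2)], a))
      (PySem.List.enumerate Q 0, ans)).2
    = List.foldl max ans (pvCands Q s l) := by
  induction l with
  | nil => intro Q s ans _; simp [pvStates, pvCands]
  | cons v l ih =>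
    intro Q s ans hans
    simp only [pvStates, pvCands, PySem.List.enumerate_cons, List.foldl_cons]
    have henum : PySem.List.enumerate Q 0 ++ [((Q.length : Int), pvStep s v)]
        = PySem.List.enumerate (Q ++ [pvStep s v]) 0 := by
      rw [PySem.List.enumerate_append]
      simp [PySem.List.enumerate]
    have hlen : (Q.length : Int) + 1 = (((Q ++ [pvStep s v]).length : Nat) : Int) := by simp
    have hinner := pv_inner Q (pvStep s v) 0 (Q.length : Int) ans (by omega)
    simp only [zero_add] at hinner
    cases hx : PySem.List.index? Q (pvStep s v) with
    | some i =>
      rw [hx] at hinner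
      simp only [hinner, henum, hlen]
      rw [ih _ _ _ (le_trans hans (le_max_left _ _))]
    | none =>
      rw [hx] at hinner
      simp only [hinner, henum, hlen]
      rw [ih _ _ _ hans]
      rw [max_eq_left hans]

lemma pv_index_append_single {Q : List (Int × Int)} {t p : Int × Int}
    (h : p ∈ Q ∨ p ≠ t) :
    PySem.List.index? (Q ++ [t]) p = PySem.List.index? Q p := by
  by_cases hm : p ∈ Q
  · exact PySem.List.index?_append_of_mem [t] hm
  · rcases h with h | h
    · exact absurd h hm
    · rw [(PySem.List.index?_eq_none_iff _ _).2 hm, (PySem.List.index?_eq_none_iff _ _).2]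
      simp [hm, h]

lemma pv_A_loop (l : List Int) : ∀ (Q : List (Int × Int)) (seen : PySem.Dict (Int × Int) Int)
    (s : Int × Int) (ans : Int),
    (∀ p, seen.get? p = (PySem.List.index? Q p).map (fun (i : Nat) => (i : Int) - 1)) →
    0 ≤ ans →
    ((PySem.List.enumerate l ((Q.length : Int) - 1)).foldl
      (fun (st : PySem.Dict (Int × Int) Int × (Int × Int) × Int) iv =>
        let xr := PySem.Int.bxor st.2.1.1 iv.2
        let df := st.2.1.2 + (if PySem.Int.mod iv.2 2 = 0 then (1 : Int) else -1)
        match st.1.get? (xr, df) with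
        | some j => (st.1, (xr, df), max st.2.2 (iv.1 - j))
        | none => (st.1.insert (xr, df) iv.1, (xr, df), st.2.2))
      (seen, s, ans)).2.2
    = List.foldl max ans (pvCands Q s l) := by
  induction l with
  | nil => intro Q seen s ans _ _; simp [pvCands]
  | cons v l ih =>
    intro Q seen s ans hinv hans
    have hpair : (PySem.Int.bxor s.1 v, s.2 + (if PySem.Int.mod v 2 = 0 then (1 : Int) else -1))
        = pvStep s v := rfl
    have hd := hinv (pvStep s v)
    simp only [PySem.List.enumerate_cons, List.foldl_cons, pvCands]
    cases hx : PySem.List.index? Q (pvStep s v) with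
    | some i =>
      rw [hx] at hd
      have hmem : pvStep s v ∈ Q :=
        (PySem.List.index?_isSome_iff Q _).1 (by rw [hx]; rfl)
      simp only [hpair, hd, Option.map_some]
      have hlen : ((Q.length : Int) - 1) + 1 = (((Q ++ [pvStep s v]).length : Nat) : Int) - 1 := by
        simp
      rw [hlen]
      have hinv' : ∀ p, seen.get? p
          = (PySem.List.index? (Q ++ [pvStep s v]) p).map (fun (i : Nat) => (i : Int) - 1) := by
        intro p
        rw [pv_index_append_single (by
          by_cases hp : p = pvStep s v
          · exact Or.inl (hp ▸ hmem)
          · exact Or.inr hp)]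
        exact hinv p
      rw [ih _ _ _ _ hinv' (le_trans hans (le_max_left _ _))]
      rw [show ((Q.length : Int) - 1 - ((i : Int) - 1)) = (Q.length : Int) - (i : Int) by ring]
    | none =>
      rw [hx] at hd
      have hnm : pvStep s v ∉ Q := (PySem.List.index?_eq_none_iff _ _).1 hx
      simp only [hpair, hd, Option.map_none]
      have hlen : ((Q.length : Int) - 1) + 1 = (((Q ++ [pvStep s v]).length : Nat) : Int) - 1 := by
        simp
      rw [hlen]
      have hinv' : ∀ p, (seen.insert (pvStep s v) ((Q.length : Int) - 1)).get? p
          = (PySem.List.index? (Q ++ [pvStep s v]) p).map (fun (i : Nat) => (i : Int) - 1) := by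
        intro p
        by_cases hp : p = pvStep s v
        · subst hp
          rw [PySem.Dict.get?_insert_self, PySem.List.index?_append_singleton_self Q _ hnm]
          simp
        · rw [PySem.Dict.get?_insert_of_ne _ _ hp, pv_index_append_single (Or.inr hp)]
          exact hinv p
      rw [ih _ _ _ _ hinv' hans]
      rw [max_eq_left hans]

-- ===== VERDICT (by name: the statement is the Claim_ definition above) =====
theorem maxBalancedSubarray_spec : Claim_equal_maxBalancedSubarray := by
  intro nums _
  unfold Spec_maxBalancedSubarray
  have hinv0 : ∀ p, (PySem.Dict.empty.insert ((0 : Int), (0 : Int)) (-1)).get? p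
      = (PySem.List.index? [((0 : Int), (0 : Int))] p).map (fun (i : Nat) => (i : Int) - 1) := by
    intro p
    by_cases hp : p = ((0 : Int), (0 : Int))
    · subst hp
      rw [PySem.Dict.get?_insert_self, PySem.List.index?_cons_self]
      rfl
    · rw [PySem.Dict.get?_insert_of_ne _ _ hp, PySem.Dict.get?_empty,
        (PySem.List.index?_eq_none_iff _ _).2 (by simp [hp])]
      rfl
  have hA : maxBalancedSubarray nums
      = List.foldl max 0 (pvCands [((0 : Int), (0 : Int))] ((0 : Int), (0 : Int)) nums) := by
    unfold maxBalancedSubarray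
    have h := pv_A_loop nums [((0 : Int), (0 : Int))]
      (PySem.Dict.empty.insert ((0 : Int), (0 : Int)) (-1)) ((0 : Int), (0 : Int)) 0 hinv0 le_rfl
    simpa using h
  have hB : maxBalancedSubarray_alt nums
      = List.foldl max 0 (pvCands [((0 : Int), (0 : Int))] ((0 : Int), (0 : Int)) nums) := by
    unfold maxBalancedSubarray_alt
    rw [pv_build]
    simp only [List.singleton_append, PySem.List.enumerate_cons, List.foldl_cons,
      List.foldl_nil, List.nil_append]
    have h := pv_B_loop nums [((0 : Int), (0 : Int))] ((0 : Int), (0 : Int)) 0 le_rfl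
    simp only [PySem.List.enumerate] at h ⊢
    simpa using h
  rw [hA, hB]
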